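-- pv_equiv track=rewrite | github.com/shaxriyor-coder/test-botn2 | app/services/utility.py | sort_bubbles
-- ===== SOURCE A (Python) =====
-- def sort_bubbles(bubbles, y_tolerance=8):
--     """Doirachalarni sortlash"""
--
--     bubbles.sort(key=lambda x: x[1])
--
--     sorted_bubbles = []
--     current_row = []
--
--     for bubble in bubbles:
--         if not current_row:
--             current_row.append(bubble)
--         else:
--             if abs(bubble[1] - current_row[-1][1]) > y_tolerance:
--                 current_row.sort(key=lambda x: x[0])
--                 sorted_bubbles.extend(current_row)
--                 current_row = [bubble]
--             else:
--                 current_row.append(bubble)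
--
--     if current_row:
--         current_row.sort(key=lambda x: x[0])
--         sorted_bubbles.extend(current_row)
--
--     return sorted_bubbles
-- ===== SOURCE B (Python) =====
-- def sort_bubbles(bubbles, y_tolerance=8):
--     """Doirachalarni sortlash"""
--     # One global composite-key stable sort instead of per-row incremental sorting.
--     bubbles.sort(key=lambda b: b[1])
--     tagged = []
--     gid = 0
--     prev_y = None
--     for b in bubbles:
--         if prev_y is not None and abs(b[1] - prev_y) > y_tolerance:
--             gid += 1
--         tagged.append((gid, b))
--         prev_y = b[1]
--     return [b for _, b in sorted(tagged, key=lambda t: (t[0], t[1][0]))]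
-- ===== Notes on version B (the rewrite author's own statement) =====
-- stated objective: alternative
-- what changed: Instead of accumulating each row and sorting-and-extending it incrementally, B tags every bubble with a row id in one linear pass over the y-sorted list and then performs a single global stable sort on the composite key (row id, x).
import Mathlib
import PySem

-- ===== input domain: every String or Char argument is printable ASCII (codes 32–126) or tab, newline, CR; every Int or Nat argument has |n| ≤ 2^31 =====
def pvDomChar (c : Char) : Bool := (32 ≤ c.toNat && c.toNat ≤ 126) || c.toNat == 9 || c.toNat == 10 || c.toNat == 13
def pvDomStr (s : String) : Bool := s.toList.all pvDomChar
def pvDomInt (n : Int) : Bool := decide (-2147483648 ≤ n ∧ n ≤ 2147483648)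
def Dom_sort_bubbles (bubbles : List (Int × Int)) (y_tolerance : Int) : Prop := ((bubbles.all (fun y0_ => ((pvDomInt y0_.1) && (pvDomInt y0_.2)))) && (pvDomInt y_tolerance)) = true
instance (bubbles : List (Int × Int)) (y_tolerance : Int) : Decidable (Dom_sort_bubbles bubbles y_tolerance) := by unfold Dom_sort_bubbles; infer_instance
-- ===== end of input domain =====

-- B replaces A's per-row incremental sort-and-extend with one linear row-tagging pass plus a single
-- global stable composite-key sort (objective: alternative). A sorts `bubbles` in place; B performs
-- the same in-place sort; the equivalence proved here is about the return value.

-- ===== PORT A =====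
-- loop body of A's `for bubble in bubbles` (state = (sorted_bubbles, current_row))
def pvStepA (y_tolerance : Int) (st : List (Int × Int) × List (Int × Int)) (bubble : Int × Int) :
    List (Int × Int) × List (Int × Int) :=
  if h : st.2 = [] then (st.1, [bubble])
  else if |bubble.2 - (st.2.getLast h).2| > y_tolerance then
    (st.1 ++ PySem.List.sorted st.2 (fun x => x.1) false, [bubble])
  else (st.1, st.2 ++ [bubble])

def sort_bubbles (bubbles : List (Int × Int)) (y_tolerance : Int) : List (Int × Int) :=
  let ys := PySem.List.sorted bubbles (fun x => x.2) false
  let st := ys.foldl (pvStepA y_tolerance) ([], [])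
  if st.2 = [] then st.1 else st.1 ++ PySem.List.sorted st.2 (fun x => x.1) false

-- ===== PORT B =====
-- loop body of B's tagging pass (state = (tagged, gid, prev_y))
def pvStepB (y_tolerance : Int) (st : List (Int × (Int × Int)) × Int × Option Int) (b : Int × Int) :
    List (Int × (Int × Int)) × Int × Option Int :=
  let gid :=
    match st.2.2 with
    | some py => if |b.2 - py| > y_tolerance then st.2.1 + 1 else st.2.1
    | none => st.2.1
  (st.1 ++ [(gid, b)], gid, some b.2)

def sort_bubbles_alt (bubbles : List (Int × Int)) (y_tolerance : Int) : List (Int × Int) :=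
  let ys := PySem.List.sorted bubbles (fun x => x.2) false
  let st := ys.foldl (pvStepB y_tolerance) ([], 0, none)
  (PySem.List.sorted2 st.1 (fun t => t.1) (fun t => t.2.1) false).map (fun t => t.2)

-- ===== PRECONDITION & SPEC =====
def Spec_sort_bubbles (bubbles : List (Int × Int)) (y_tolerance : Int) (out : List (Int × Int)) : Prop := out = sort_bubbles_alt bubbles y_tolerance
instance (bubbles : List (Int × Int)) (y_tolerance : Int) (out : List (Int × Int)) : Decidable (Spec_sort_bubbles bubbles y_tolerance out) := by unfold Spec_sort_bubbles; infer_instance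

-- ===== CLAIM (what is proved, stated in full; the proofs are below) =====
def Claim_equal_sort_bubbles : Prop := ∀ (bubbles : List (Int × Int)) (y_tolerance : Int), Dom_sort_bubbles bubbles y_tolerance → Spec_sort_bubbles bubbles y_tolerance (sort_bubbles bubbles y_tolerance)

-- ===== LEMMAS AND PROOFS =====

-- sort a row by x
def pvSortX (g : List (Int × Int)) : List (Int × Int) := PySem.List.sorted g (fun x => x.1) false

-- split a y-sorted list into rows: `cur` is the open row, `lasty` the y of its last element
def pvGo (tol : Int) (cur : List (Int × Int)) (lasty : Int) :
    List (Int × Int) → List (List (Int × Int))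
  | [] => [cur]
  | b :: rest =>
    if tol < |b.2 - lasty| then cur :: pvGo tol [b] b.2 rest
    else pvGo tol (cur ++ [b]) b.2 rest

def pvGroups (tol : Int) : List (Int × Int) → List (List (Int × Int))
  | [] => []
  | b :: rest => pvGo tol [b] b.2 rest

-- tag the rows with consecutive group ids
def pvTagGroups (i : Int) : List (List (Int × Int)) → List (Int × (Int × Int))
  | [] => []
  | g :: gs => g.map (fun b => (i, b)) ++ pvTagGroups (i + 1) gs

-- ---- A characterised as flatMap of per-row sorts ----

def pvFin (st : List (Int × Int) × List (Int × Int)) : List (Int × Int) :=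
  if st.2 = [] then st.1 else st.1 ++ PySem.List.sorted st.2 (fun x => x.1) false

lemma pvA_loop (tol : Int) :
    ∀ (rest : List (Int × Int)) (acc cur : List (Int × Int)) (lasty : Int)
      (h : cur ≠ []), (cur.getLast h).2 = lasty →
      pvFin (rest.foldl (pvStepA tol) (acc, cur))
        = acc ++ (pvGo tol cur lasty rest).flatMap pvSortX := by
  intro rest
  induction rest with
  | nil =>
    intro acc cur lasty h _
    simp [pvFin, pvGo, pvSortX, h]
  | cons b rest ih =>
    intro acc cur lasty h hl
    have hval : ∀ (p : cur ≠ []), (cur.getLast p).2 = lasty := fun _ => hl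
    have hstep : pvStepA tol (acc, cur) b
        = if |b.2 - lasty| > tol
          then (acc ++ PySem.List.sorted cur (fun x => x.1) false, [b])
          else (acc, cur ++ [b]) := by
      simp only [pvStepA]
      rw [dif_neg h, hval]
    rw [List.foldl_cons, hstep]
    by_cases hb : |b.2 - lasty| > tol
    · rw [if_pos hb,
        ih (acc ++ PySem.List.sorted cur (fun x => x.1) false) [b] b.2 (by simp) rfl]
      simp only [pvGo, if_pos hb, List.flatMap_cons]
      simp [pvSortX, List.append_assoc]
    · rw [if_neg hb, ih acc (cur ++ [b]) b.2 (by simp) (by simp)]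
      simp only [pvGo, if_neg hb]

lemma pvA_char (bubbles : List (Int × Int)) (tol : Int) :
    sort_bubbles bubbles tol
      = (pvGroups tol (PySem.List.sorted bubbles (fun x => x.2) false)).flatMap pvSortX := by
  have hdef : sort_bubbles bubbles tol
      = pvFin ((PySem.List.sorted bubbles (fun x => x.2) false).foldl (pvStepA tol) ([], [])) :=
    rfl
  rw [hdef]
  generalize PySem.List.sorted bubbles (fun x => x.2) false = ys
  cases ys with
  | nil => simp [pvGroups, pvFin]
  | cons b rest =>
    rw [List.foldl_cons, show pvStepA tol ([], []) b = ([], [b]) from by simp [pvStepA]]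
    simpa [pvGroups] using pvA_loop tol rest [] [b] b.2 (by simp) rfl

-- ---- B's tagging loop characterised via pvGroups ----

lemma pvB_loop (tol : Int) :
    ∀ (rest : List (Int × Int)) (T : List (Int × (Int × Int))) (cur : List (Int × Int))
      (gid lasty : Int),
      (rest.foldl (pvStepB tol) (T ++ cur.map (fun b => (gid, b)), gid, some lasty)).1
        = T ++ pvTagGroups gid (pvGo tol cur lasty rest) := by
  intro rest
  induction rest with
  | nil =>
    intro T cur gid lasty
    simp [pvTagGroups, pvGo]
  | cons b rest ih =>
    intro T cur gid lasty
    simp only [List.foldl_cons, pvStepB]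
    by_cases hb : tol < |b.2 - lasty|
    · rw [show (if |b.2 - lasty| > tol then gid + 1 else gid) = gid + 1 from if_pos hb]
      have := ih (T ++ cur.map (fun b => (gid, b))) [b] (gid + 1) b.2
      simp only [List.map_cons, List.map_nil] at this
      rw [show T ++ cur.map (fun b => (gid, b)) ++ [(gid + 1, b)]
          = (T ++ cur.map (fun b => (gid, b))) ++ [(gid + 1, b)] from by simp [List.append_assoc]]
      rw [this]
      simp only [pvGo, if_pos hb, pvTagGroups, List.append_assoc]
    · rw [show (if |b.2 - lasty| > tol then gid + 1 else gid) = gid from if_neg hb]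
      have := ih T (cur ++ [b]) gid b.2
      simp only [List.map_append, List.map_cons, List.map_nil] at this
      rw [show T ++ cur.map (fun b => (gid, b)) ++ [(gid, b)]
          = T ++ (cur.map (fun b => (gid, b)) ++ [(gid, b)]) from by simp [List.append_assoc]]
      rw [this]
      simp only [pvGo, if_neg hb]

-- ---- stability lemmas for insertBy folds ----

lemma pvInsertBy_append_left {α : Type} (before : α → α → Bool) (x : α) :
    ∀ (u w : List α), (∀ y ∈ u, before x y = false) →
      PySem.List.insertBy before x (u ++ w) = u ++ PySem.List.insertBy before x w := by
  intro u w h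
  induction u with
  | nil => simp
  | cons y u ih =>
    simp only [List.cons_append, PySem.List.insertBy]
    rw [h y (by simp)]
    simp only [Bool.false_eq_true, if_false, List.cons.injEq, true_and]
    exact ih (fun y hy => h y (by simp [hy]))

lemma pvFoldl_insertBy_prefix {α : Type} (before : α → α → Bool) :
    ∀ (v : List α) (u w : List α), (∀ x ∈ v, ∀ y ∈ u, before x y = false) →
      v.foldl (fun acc x => PySem.List.insertBy before x acc) (u ++ w)
        = u ++ v.foldl (fun acc x => PySem.List.insertBy before x acc) w := by
  intro v
  induction v with
  | nil => simp
  | cons x v ih =>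
    intro u w h
    simp only [List.foldl_cons]
    rw [pvInsertBy_append_left before x u w (fun y hy => h x (by simp) y hy)]
    exact ih u _ (fun a ha y hy => h a (by simp [ha]) y hy)

lemma pvInsertBy_congr {α : Type} (before before' : α → α → Bool) (x : α) :
    ∀ (l : List α), (∀ y ∈ l, before x y = before' x y) →
      PySem.List.insertBy before x l = PySem.List.insertBy before' x l := by
  intro l
  induction l with
  | nil => intro _; rfl
  | cons y l ih =>
    intro h
    simp only [PySem.List.insertBy, h y (by simp)]
    rw [ih (fun z hz => h z (by simp [hz]))]

lemma pvMem_insertBy {α : Type} (before : α → α → Bool) (x : α) (l : List α) (y : α) :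
    y ∈ PySem.List.insertBy before x l → y = x ∨ y ∈ l := by
  induction l with
  | nil => simp [PySem.List.insertBy]
  | cons z l ih =>
    simp only [PySem.List.insertBy]
    split
    · intro h; rcases List.mem_cons.mp h with h | h
      · exact Or.inl h
      · exact Or.inr h
    · intro h; rcases List.mem_cons.mp h with h | h
      · exact Or.inr (by simp [h])
      · rcases ih h with h | h
        · exact Or.inl h
        · exact Or.inr (by simp [h])

lemma pvFoldl_insertBy_congr {α : Type} (before before' : α → α → Bool) :
    ∀ (l acc : List α),
      (∀ x ∈ l, ∀ y, (y ∈ acc ∨ y ∈ l) → before x y = before' x y) →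
      l.foldl (fun a x => PySem.List.insertBy before x a) acc
        = l.foldl (fun a x => PySem.List.insertBy before' x a) acc := by
  intro l
  induction l with
  | nil => intro _ _; rfl
  | cons x l ih =>
    intro acc h
    simp only [List.foldl_cons]
    rw [pvInsertBy_congr before before' x acc
        (fun y hy => h x (by simp) y (Or.inl hy))]
    refine ih _ (fun z hz y hy => ?_)
    rcases hy with hy | hy
    · rcases pvMem_insertBy before' x acc y hy with hy | hy
      · subst hy; exact h z (by simp [hz]) y (by simp)
      · exact h z (by simp [hz]) y (Or.inl hy)
    · exact h z (by simp [hz]) y (Or.inr (by simp [hy]))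

lemma pvInsertBy_map {α β : Type} (before : β → β → Bool) (before' : α → α → Bool)
    (f : α → β) (hb : ∀ a b, before (f a) (f b) = before' a b) (x : α) :
    ∀ (l : List α), PySem.List.insertBy before (f x) (l.map f)
      = (PySem.List.insertBy before' x l).map f := by
  intro l
  induction l with
  | nil => rfl
  | cons y l ih =>
    simp only [List.map_cons, PySem.List.insertBy, hb x y]
    split
    · rfl
    · simp [ih]

-- sorted2 splits across a strict k1-boundary
lemma pvSorted2_append (u v : List (Int × (Int × Int)))
    (h : ∀ a ∈ u, ∀ b ∈ v, a.1 < b.1) :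
    PySem.List.sorted2 (u ++ v) (fun t => t.1) (fun t => t.2.1) false
      = PySem.List.sorted2 u (fun t => t.1) (fun t => t.2.1) false
        ++ PySem.List.sorted2 v (fun t => t.1) (fun t => t.2.1) false := by
  simp only [PySem.List.sorted2, List.foldl_append, Bool.false_eq_true, if_false]
  rw [show (u.foldl (fun acc x =>
        PySem.List.insertBy
          (fun a b => decide (a.1 < b.1) || !decide (b.1 < a.1) && decide (a.2.1 < b.2.1)) x acc) [])
      = (u.foldl (fun acc x =>
        PySem.List.insertBy
          (fun a b => decide (a.1 < b.1) || !decide (b.1 < a.1) && decide (a.2.1 < b.2.1)) x acc) []) ++ []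
      from (List.append_nil _).symm]
  rw [pvFoldl_insertBy_prefix]
  · simp
  intro x hx y hy
  have hyu : y ∈ u := (PySem.List.sorted2_perm u (fun t => t.1) (fun t => t.2.1) false).mem_iff.mp hy
  have : y.1 < x.1 := h y hyu x hx
  simp only [Bool.or_eq_false_iff, Bool.and_eq_false_iff, Bool.not_eq_false',
    decide_eq_false_iff_not, decide_eq_true_eq, not_lt]
  exact ⟨le_of_lt this, Or.inl this⟩

-- on a constant-k1 block, sorted2 is the stable sort by k2, which commutes with tagging
lemma pvSorted2_const (i : Int) (g : List (Int × Int)) :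
    PySem.List.sorted2 (g.map (fun b => (i, b))) (fun t => t.1) (fun t => t.2.1) false
      = (PySem.List.sorted g (fun x => x.1) false).map (fun b => (i, b)) := by
  simp only [PySem.List.sorted2, PySem.List.sorted, Bool.false_eq_true, if_false]
  rw [pvFoldl_insertBy_congr
      (fun a b => decide (a.1 < b.1) || !decide (b.1 < a.1) && decide (a.2.1 < b.2.1))
      (fun (a b : Int × (Int × Int)) => decide (a.2.1 < b.2.1)) (g.map (fun b => (i, b))) []
      ?_]
  · have key : ∀ (l : List (Int × Int)),
        (g.map (fun b => (i, b))).foldl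
            (fun a x => PySem.List.insertBy (fun a b => decide (a.2.1 < b.2.1)) x a)
            (l.map (fun b => (i, b)))
          = (g.foldl (fun a x => PySem.List.insertBy (fun a b => decide (a.1 < b.1)) x a) l).map
              (fun b => (i, b)) := by
      induction g with
      | nil => intro l; rfl
      | cons b g ih =>
        intro l
        simp only [List.map_cons, List.foldl_cons]
        rw [pvInsertBy_map (fun a b => decide (a.2.1 < b.2.1))
            (fun (a b : Int × Int) => decide (a.1 < b.1)) (fun b => (i, b))
            (fun a b => rfl) b l]
        exact ih _
    exact key []
  · intro x hx y hy
    rcases hy with hy | hy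
    · simp at hy
    · rcases List.mem_map.mp hx with ⟨a, _, rfl⟩
      rcases List.mem_map.mp hy with ⟨c, _, rfl⟩
      simp

lemma pvTagGroups_ge (i : Int) : ∀ (gs : List (List (Int × Int))),
    ∀ t ∈ pvTagGroups i gs, i ≤ t.1 := by
  intro gs
  induction gs generalizing i with
  | nil => simp [pvTagGroups]
  | cons g gs ih =>
    intro t ht
    rcases List.mem_append.mp ht with ht | ht
    · rcases List.mem_map.mp ht with ⟨b, _, rfl⟩; simp
    · exact le_trans (by omega) (ih (i + 1) t ht)

lemma pvB_char (gs : List (List (Int × Int))) : ∀ (i : Int),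
    (PySem.List.sorted2 (pvTagGroups i gs) (fun t => t.1) (fun t => t.2.1) false).map
        (fun t => t.2)
      = gs.flatMap pvSortX := by
  induction gs with
  | nil => intro i; rfl
  | cons g gs ih =>
    intro i
    show (PySem.List.sorted2 (g.map (fun b => (i, b)) ++ pvTagGroups (i + 1) gs) _ _ false).map _ = _
    rw [pvSorted2_append _ _ ?_]
    · rw [pvSorted2_const, List.map_append, List.map_map]
      simp only [List.flatMap_cons]
      congr 1
      · simp [pvSortX]
      · exact ih (i + 1)
    · intro a ha b hb
      rcases List.mem_map.mp ha with ⟨c, _, rfl⟩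
      have := pvTagGroups_ge (i + 1) gs b hb
      omega

-- ===== VERDICT (by name: the statement is the Claim_ definition above) =====
theorem sort_bubbles_spec : Claim_equal_sort_bubbles := by
  intro bubbles tol _
  show sort_bubbles bubbles tol = sort_bubbles_alt bubbles tol
  rw [pvA_char]
  unfold sort_bubbles_alt
  cases hys : PySem.List.sorted bubbles (fun x => x.2) false with
  | nil => simp [pvGroups]; rfl
  | cons b rest =>
    have h0 : rest.foldl (pvStepB tol) ([(0, b)], 0, some b.2)
        = rest.foldl (pvStepB tol)
            (([] : List (Int × (Int × Int))) ++ [b].map (fun b => ((0 : Int), b)),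
             (0 : Int), some b.2) := by simp
    simp only [List.foldl_cons, pvStepB]
    rw [show (([] : List (Int × (Int × Int))) ++ [((0 : Int), b)]) = [((0 : Int), b)] by simp]
    rw [h0, pvB_loop]
    simp [pvGroups, pvB_char]
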